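-- pv_equiv track=rewrite | github.com/esafier/8K-Analyzer | earnings.py | _find_next_earnings
-- ===== SOURCE A (Python) =====
-- def _find_next_earnings(entries, today):
--     """Given a list of earnings entries from the API, find the next upcoming one.
--     Returns {'date': 'YYYY-MM-DD', 'timing': 'before_market'} or None."""
--     if not entries:
--         return None
--
--     # Collect all future dates
--     future = []
--     for entry in entries:
--         date_str = entry.get("date", "")
--         if date_str and date_str >= today:
--             future.append(entry)
--
--     if not future:
--         return None
--
--     # Sort by date and take the earliest upcoming one
--     future.sort(key=lambda x: x.get("date", ""))
--     closest = future[0]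
--
--     return {
--         "date": closest.get("date", ""),
--         "timing": closest.get("earnings_timing", ""),
--     }
-- ===== SOURCE B (Python) =====
-- def _find_next_earnings(entries, today):
--     """Single pass: keep the first-seen entry with the smallest future date; no list, no sort."""
--     best = None
--     for entry in entries:
--         date = entry.get("date", "")
--         if date and date >= today and (best is None or date < best.get("date", "")):
--             best = entry
--     if best is None:
--         return None
--     return {
--         "date": best.get("date", ""),
--         "timing": best.get("earnings_timing", ""),
--     }
-- ===== Notes on version B (the rewrite author's own statement) =====
-- stated objective: simpler
-- what changed: Replaces the build-a-filtered-list-then-stable-sort-and-take-head approach with a single pass that maintains the running earliest future entry (strict < keeps the first of tied dates, matching the stable sort).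
import Mathlib
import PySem

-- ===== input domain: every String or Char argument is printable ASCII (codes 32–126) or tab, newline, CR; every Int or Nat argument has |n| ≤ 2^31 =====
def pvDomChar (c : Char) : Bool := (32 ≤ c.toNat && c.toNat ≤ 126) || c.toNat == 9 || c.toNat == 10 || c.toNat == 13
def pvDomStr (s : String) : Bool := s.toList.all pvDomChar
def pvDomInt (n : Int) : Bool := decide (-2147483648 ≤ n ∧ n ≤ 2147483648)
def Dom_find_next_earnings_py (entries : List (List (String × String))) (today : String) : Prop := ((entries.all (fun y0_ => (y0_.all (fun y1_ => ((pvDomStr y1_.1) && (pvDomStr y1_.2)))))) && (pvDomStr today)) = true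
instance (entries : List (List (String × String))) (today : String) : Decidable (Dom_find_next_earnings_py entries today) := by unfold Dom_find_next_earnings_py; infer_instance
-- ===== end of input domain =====

-- B replaces A's filter-then-stable-sort-then-head with a single running-minimum pass (simpler, one traversal).

-- ===== PORT A =====
-- entry.get(k, "") on the association-list dict
def pvGetD (d : List (String × String)) (k : String) : String :=
  (PySem.Dict.mk d).getD k ""

-- 'date_str and date_str >= today'
def pvFut (today : String) (e : List (String × String)) : Bool :=
  decide (pvGetD e "date" ≠ "" ∧ today ≤ pvGetD e "date")

def find_next_earnings_py (entries : List (List (String × String))) (today : String) : Option (List (String × String)) :=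
  if entries = [] then none
  else
    let future := entries.foldl (fun acc e => if pvFut today e then acc ++ [e] else acc) []
    if future = [] then none
    else
      match PySem.List.sorted future (fun x => pvGetD x "date") false with
      | [] => none   -- unreachable: future ≠ []
      | closest :: _ =>
          some [("date", pvGetD closest "date"), ("timing", pvGetD closest "earnings_timing")]

-- ===== PORT B =====
def find_next_earnings_py_alt (entries : List (List (String × String))) (today : String) : Option (List (String × String)) :=
  let best := entries.foldl (fun best e =>
    let d := pvGetD e "date"
    if d = "" then best
    else if d < today then best
    else match best with
      | none => some e
      | some b => if d < pvGetD b "date" then some e else best) none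
  match best with
  | none => none
  | some b => some [("date", pvGetD b "date"), ("timing", pvGetD b "earnings_timing")]

-- ===== PRECONDITION & SPEC =====
def Spec_find_next_earnings_py (entries : List (List (String × String))) (today : String) (out : Option (List (String × String))) : Prop := out = find_next_earnings_py_alt entries today
instance (entries : List (List (String × String))) (today : String) (out : Option (List (String × String))) : Decidable (Spec_find_next_earnings_py entries today out) := by unfold Spec_find_next_earnings_py; infer_instance

-- ===== CLAIM (what is proved, stated in full; the proofs are below) =====
def Claim_equal_find_next_earnings_py : Prop := ∀ (entries : List (List (String × String))) (today : String), Dom_find_next_earnings_py entries today → Spec_find_next_earnings_py entries today (find_next_earnings_py entries today)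

-- ===== LEMMAS AND PROOFS =====

-- B's loop step, skipping non-future entries
def bStep (today : String) (best : Option (List (String × String))) (e : List (String × String)) :
    Option (List (String × String)) :=
  let d := pvGetD e "date"
  if d = "" then best
  else if d < today then best
  else match best with
    | none => some e
    | some b => if d < pvGetD b "date" then some e else best

-- B's fold over entries is min? over the filtered list
theorem bfold_eq_min? (today : String) (l : List (List (String × String)))
    (acc : Option (List (String × String))) :
    l.foldl (bStep today) acc =
      (l.filter (pvFut today)).foldl
        (fun acc x => match acc with
          | none => some x
          | some m => if pvGetD x "date" < pvGetD m "date" then some x else some m) acc := by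
  induction l generalizing acc with
  | nil => rfl
  | cons e t ih =>
    by_cases h : pvFut today e = true
    · have h' : pvGetD e "date" ≠ "" ∧ today ≤ pvGetD e "date" := by
        simpa [pvFut] using h
      simp only [List.foldl_cons, List.filter_cons, h, if_pos]
      rw [ih]
      congr 1
      simp only [bStep]
      rw [if_neg h'.1, if_neg (by exact not_lt_of_ge h'.2)]
      cases acc <;> rfl
    · have h' : ¬ (pvGetD e "date" ≠ "" ∧ today ≤ pvGetD e "date") := by
        simpa [pvFut] using h
      simp only [List.foldl_cons, List.filter_cons, h]
      rw [ih]
      congr 1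
      simp only [bStep]
      by_cases h1 : pvGetD e "date" = ""
      · rw [if_pos h1]
      · rw [if_neg h1, if_pos (by by_contra hc; exact h' ⟨h1, le_of_not_gt hc⟩)]

-- head of the stable sort is min? (first extremal element)
theorem head_sorted_eq_min? {α κ : Type} [LinearOrder κ] (key : α → κ) (l : List α) :
    (PySem.List.sorted l key false).head? = PySem.List.min? l key := by
  induction l using List.reverseRecOn with
  | nil => rfl
  | append_singleton t x ih =>
    rw [PySem.List.sorted_eq_foldl_insertBy, List.foldl_append, List.foldl_cons, List.foldl_nil,
      ← PySem.List.sorted_eq_foldl_insertBy]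
    rw [PySem.List.min?, List.foldl_append, List.foldl_cons, List.foldl_nil, ← PySem.List.min?]
    rw [← ih]
    cases hs : PySem.List.sorted t key false with
    | nil => rfl
    | cons m rest =>
      simp only [PySem.List.insertBy, List.head?_cons]
      by_cases h : key x < key m
      · simp [h]
      · simp [h]

theorem find_next_earnings_py_eq_alt (entries : List (List (String × String))) (today : String) :
    find_next_earnings_py entries today = find_next_earnings_py_alt entries today := by
  unfold find_next_earnings_py find_next_earnings_py_alt
  have hfut : entries.foldl (fun acc e => if pvFut today e then acc ++ [e] else acc) [] =
      entries.filter (pvFut today) := by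
    simpa using PySem.List.foldl_append_if (pvFut today) id entries []
  have hb : entries.foldl (bStep today) none =
      PySem.List.min? (entries.filter (pvFut today)) (fun x => pvGetD x "date") := by
    rw [bfold_eq_min?]
    unfold PySem.List.min?
    congr 1
    funext acc x
    cases acc with
    | none => rfl
    | some m => simp only []
  have hbstep : (fun (best : Option (List (String × String))) (e : List (String × String)) =>
      let d := pvGetD e "date"
      if d = "" then best
      else if d < today then best
      else match best with
        | none => some e
        | some b => if d < pvGetD b "date" then some e else best) = bStep today := rfl
  simp only [hbstep, hb, hfut]
  by_cases he : entries = []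
  · subst he; rfl
  · rw [if_neg he]
    by_cases hf : entries.filter (pvFut today) = []
    · simp [hf, PySem.List.min?]
    · rw [if_neg hf]
      have hmin := head_sorted_eq_min? (fun x => pvGetD x "date") (entries.filter (pvFut today))
      cases hs : PySem.List.sorted (entries.filter (pvFut today)) (fun x => pvGetD x "date") false with
      | nil =>
        exact absurd ((PySem.List.sorted_eq_nil_iff _ _ _).mp hs) hf
      | cons c rest =>
        rw [hs] at hmin
        simp only [List.head?_cons] at hmin
        rw [← hmin]

-- ===== VERDICT (by name: the statement is the Claim_ definition above) =====
theorem find_next_earnings_py_spec : Claim_equal_find_next_earnings_py := by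
  intro entries today _
  unfold Spec_find_next_earnings_py
  exact find_next_earnings_py_eq_alt entries today
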